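-- pv_equiv track=rewrite | github.com/pedroarthurob/CompetitiveProgramming | CSES/1632.py | assign_movies_to_members
-- ===== SOURCE A (Python) =====
-- def assign_movies_to_members(k, movies):
--     movies.sort(key=lambda x: x[1])  # Ordena os filmes por tempo de término
--     members = [0] * k  # Inicializa a coleção com k zeros
--     assigned = 0  # Inicializa o número de filmes atribuídos
--
--     for movie in movies:
--         start_time, end_time = movie
--         member_index = None
--
--         # Encontra um membro disponível para assistir o filme
--         for i in range(k):
--             if members[i] <= start_time:
--                 if member_index is None or members[i] > members[member_index]:
--                     member_index = i
--
--         # Atribui o membro ao filme se encontrado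
--         if member_index is not None:
--             members[member_index] = end_time
--             assigned += 1
--
--     return assigned
-- ===== SOURCE B (Python) =====
-- # B: keep each member's next-free time in a SORTED list; for each movie (by end time)
-- # binary-search the predecessor of start_time, remove it, insert end_time in order.
-- # Note: like A, this sorts `movies` in place (same observable mutation).
--
-- def _bisect_right(a, x):
--     lo, hi = 0, len(a)
--     while lo < hi:
--         mid = (lo + hi) // 2
--         if x < a[mid]:
--             hi = mid
--         else:
--             lo = mid + 1
--     return lo
--
--
-- def assign_movies_to_members(k, movies):
--     movies.sort(key=lambda x: x[1])
--     times = [0] * k  # sorted: current free time of each member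
--     assigned = 0
--     for start, end in movies:
--         j = _bisect_right(times, start)
--         if j:  # some member is free by start; take the one freed latest
--             times.pop(j - 1)
--             times.insert(_bisect_right(times, end), end)
--             assigned += 1
--     return assigned
-- ===== Notes on version B (the rewrite author's own statement) =====
-- stated objective: faster
-- what changed: Replaces A's per-movie linear scan of all k members for the latest-freed available one with a sorted list of free times: binary search for the predecessor of start_time, remove it, insert end_time in order.
import Mathlib
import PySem

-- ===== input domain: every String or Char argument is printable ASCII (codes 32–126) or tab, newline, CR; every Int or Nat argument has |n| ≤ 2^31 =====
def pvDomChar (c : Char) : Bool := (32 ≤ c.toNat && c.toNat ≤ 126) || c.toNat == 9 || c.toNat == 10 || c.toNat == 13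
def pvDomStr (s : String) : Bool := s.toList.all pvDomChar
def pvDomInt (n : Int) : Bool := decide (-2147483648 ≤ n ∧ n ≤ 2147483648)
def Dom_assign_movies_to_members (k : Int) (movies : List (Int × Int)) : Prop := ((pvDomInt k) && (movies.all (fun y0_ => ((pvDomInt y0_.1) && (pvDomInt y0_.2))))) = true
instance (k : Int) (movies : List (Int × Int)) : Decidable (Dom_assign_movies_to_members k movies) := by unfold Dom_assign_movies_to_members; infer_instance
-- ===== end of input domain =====

-- B keeps the members' free times as a sorted list and binary-searches the predecessor of each
-- start time instead of scanning all k members for the maximum (measured faster); equivalence is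
-- about the return value (both A and B sort `movies` in place the same way).

-- ===== PORT A =====
-- inner `for i in range(k)` loop body of A; since members = [0]*k, range(k) enumerates exactly
-- the indices of members, so the loop is ported as a fold over `members` carrying the running
-- index i; the accumulator also carries (member_index, members[member_index])
def fstepA (s : Int) (mi : Option (Int × Int)) (p : Int × Int) : Option (Int × Int) :=
  if p.2 ≤ s then
    match mi with
    | none => some p
    | some q => if q.2 < p.2 then some p else mi
  else mi

-- `member_index` (with its slot's value) after the inner loop
def findMemberA (members : List Int) (s : Int) : Option (Int × Int) :=
  (members.foldl (fun (st : Option (Int × Int) × Int) v =>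
    (fstepA s st.1 (st.2, v), st.2 + 1)) (none, 0)).1

-- one iteration of the outer `for movie in movies` loop; state = (members, assigned)
def stepA (st : List Int × Int) (mv : Int × Int) : List Int × Int :=
  match findMemberA st.1 mv.1 with
  | none => st
  | some p => (st.1.set p.1.toNat mv.2, st.2 + 1)
  -- `members[member_index] = end_time`: member_index comes from enumerate, so 0 ≤ p.1 and
  -- p.1.toNat < len(members); `.set p.1.toNat` is exact here

def assign_movies_to_members (k : Int) (movies : List (Int × Int)) : Int :=
  ((PySem.List.sorted movies (fun x => x.2)).foldl stepA
    (List.replicate k.toNat 0, 0)).2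
  -- `[0] * k` with k < 0 is []: List.replicate k.toNat 0 is exact

-- ===== PORT B =====
-- one iteration of B's loop over the sorted movies; state = (times, assigned);
-- `_bisect_right` in Source B is verbatim the stdlib binary-search loop = PySem.List.bisectRight
def stepB (st : List Int × Int) (mv : Int × Int) : List Int × Int :=
  let j := PySem.List.bisectRight st.1 mv.1
  if j ≠ 0 then
    -- `times.pop(j - 1)`: 1 ≤ j ≤ len(times), index in range, popped value unused — eraseIdx is exact
    let rest := st.1.eraseIdx (j - 1)
    -- `times.insert(pos, end)` with 0 ≤ pos ≤ len(times): insertIdx is exact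
    (rest.insertIdx (PySem.List.bisectRight rest mv.2) mv.2, st.2 + 1)
  else st

def assign_movies_to_members_alt (k : Int) (movies : List (Int × Int)) : Int :=
  ((PySem.List.sorted movies (fun x => x.2)).foldl stepB
    (List.replicate k.toNat 0, 0)).2

-- ===== PRECONDITION & SPEC =====
def Spec_assign_movies_to_members (k : Int) (movies : List (Int × Int)) (out : Int) : Prop := out = assign_movies_to_members_alt k movies
instance (k : Int) (movies : List (Int × Int)) (out : Int) : Decidable (Spec_assign_movies_to_members k movies out) := by unfold Spec_assign_movies_to_members; infer_instance

-- ===== CLAIM (what is proved, stated in full; the proofs are below) =====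
def Claim_equal_assign_movies_to_members : Prop := ∀ (k : Int) (movies : List (Int × Int)), Dom_assign_movies_to_members k movies → Spec_assign_movies_to_members k movies (assign_movies_to_members k movies)

-- ===== LEMMAS AND PROOFS =====

-- invariant of A's inner loop after scanning indices 0..n-1:
-- `none` means no scanned slot is ≤ s; `some (i, v)` means i is a scanned slot, v its value,
-- v ≤ s, and v is maximal among scanned slots that are ≤ s
def FindInv (members : List Int) (s : Int) (n : Nat) : Option (Int × Int) → Prop
  | none => ∀ t : Nat, t < n → ∀ _ : t < members.length, ¬ members[t] ≤ s
  | some p => ∃ t : Nat, p.1 = (t : Int) ∧ t < n ∧ ∃ _ : t < members.length,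
      p.2 = members[t] ∧ members[t] ≤ s ∧
      ∀ u : Nat, u < n → ∀ _ : u < members.length, members[u] ≤ s → members[u] ≤ members[t]

theorem findInv_fold (members : List Int) (s : Int) :
    ∀ (suf : List Int) (n : Nat) (acc : Option (Int × Int)),
      members.drop n = suf → FindInv members s n acc →
      FindInv members s members.length
        ((suf.foldl (fun (st : Option (Int × Int) × Int) v =>
          (fstepA s st.1 (st.2, v), st.2 + 1)) (acc, (n : Int))).1) := by
  intro suf
  induction suf with
  | nil =>
    intro n acc hdrop hinv
    have hn : members.length ≤ n := by
      by_contra h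
      push Not at h
      rw [← List.length_eq_zero_iff, List.length_drop] at hdrop
      omega
    rw [List.foldl_nil]
    cases acc with
    | none => intro t ht h; exact hinv t (by omega) h
    | some p =>
      obtain ⟨t, h1, _, h3, h4, h5, h6⟩ := hinv
      exact ⟨t, h1, by omega, h3, h4, h5, fun u _ hul hus => h6 u (by omega) hul hus⟩
  | cons v suf ih =>
    intro n acc hdrop hinv
    have hn : n < members.length := by
      by_contra h
      push Not at h
      rw [List.drop_eq_nil_of_le h] at hdrop
      exact (List.cons_ne_nil v suf) hdrop.symm
    have hsplit : members[n] :: members.drop (n + 1) = v :: suf := by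
      rw [List.getElem_cons_drop hn, hdrop]
    have hv : members[n] = v := (List.cons.injEq _ _ _ _ ▸ hsplit).1
    have hsuf : members.drop (n + 1) = suf := (List.cons.injEq _ _ _ _ ▸ hsplit).2
    rw [List.foldl_cons]
    have hcast : ((n : Int) + 1) = ((n + 1 : Nat) : Int) := by push_cast; ring
    rw [hcast]
    apply ih (n + 1) _ hsuf
    -- one scan step preserves the invariant
    subst hv
    unfold fstepA
    by_cases hvs : members[n] ≤ s
    · simp only [hvs, if_pos]
      cases acc with
      | none =>
        refine ⟨n, rfl, by omega, hn, rfl, hvs, ?_⟩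
        intro u hu hul hus
        rcases Nat.lt_succ_iff_lt_or_eq.mp hu with hu' | hu'
        · exact absurd hus (hinv u hu' hul)
        · subst hu'; exact le_rfl
      | some q =>
        obtain ⟨t, hq1, htn, htl, hq2, hts, hmax⟩ := hinv
        simp only [hq2]
        by_cases hw : members[t] < members[n]
        · simp only [hw, if_pos]
          refine ⟨n, rfl, by omega, hn, rfl, hvs, ?_⟩
          intro u hu hul hus
          rcases Nat.lt_succ_iff_lt_or_eq.mp hu with hu' | hu'
          · exact le_trans (hmax u hu' hul hus) (le_of_lt hw)
          · subst hu'; exact le_rfl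
        · simp only [hw]
          refine ⟨t, hq1, by omega, htl, hq2, hts, ?_⟩
          intro u hu hul hus
          rcases Nat.lt_succ_iff_lt_or_eq.mp hu with hu' | hu'
          · exact hmax u hu' hul hus
          · subst hu'; omega
    · simp only [hvs]
      cases acc with
      | none =>
        intro t ht htl
        rcases Nat.lt_succ_iff_lt_or_eq.mp ht with ht' | ht'
        · exact hinv t ht' htl
        · subst ht'; exact hvs
      | some q =>
        obtain ⟨t, hq1, htn, htl, hq2, hts, hmax⟩ := hinv
        refine ⟨t, hq1, by omega, htl, hq2, hts, ?_⟩
        intro u hu hul hus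
        rcases Nat.lt_succ_iff_lt_or_eq.mp hu with hu' | hu'
        · exact hmax u hu' hul hus
        · subst hu'; exact absurd hus hvs

theorem findMemberA_inv (members : List Int) (s : Int) :
    FindInv members s members.length (findMemberA members s) := by
  have h0 : FindInv members s 0 none := fun t ht _ => absurd ht (by omega)
  have := findInv_fold members s members 0 none (by simp) h0
  simpa [findMemberA] using this

theorem findA_none_iff (members : List Int) (s : Int) :
    findMemberA members s = none ↔ ∀ v ∈ members, s < v := by
  have hinv := findMemberA_inv members s
  constructor
  · intro h v hv
    rw [h] at hinv
    obtain ⟨t, ht, rfl⟩ := List.mem_iff_getElem.mp hv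
    exact lt_of_not_ge (hinv t ht ht)
  · intro hall
    cases h : findMemberA members s with
    | none => rfl
    | some p =>
      rw [h] at hinv
      obtain ⟨t, _, _, htl, _, hts, _⟩ := hinv
      exact absurd hts (not_le_of_gt (hall _ (List.getElem_mem htl)))

theorem findA_some (members : List Int) (s : Int) (p : Int × Int)
    (h : findMemberA members s = some p) :
    ∃ t : Nat, p.1 = (t : Int) ∧ ∃ _ : t < members.length, members[t] ≤ s ∧
      ∀ v ∈ members, v ≤ s → v ≤ members[t] := by
  have hinv := findMemberA_inv members s
  rw [h] at hinv
  obtain ⟨t, ht1, _, htl, _, hts, hmax⟩ := hinv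
  refine ⟨t, ht1, htl, hts, ?_⟩
  intro v hv hvs
  obtain ⟨u, hu, rfl⟩ := List.mem_iff_getElem.mp hv
  exact hmax u hu hu hvs

-- B side: characterisation of the predecessor found by bisect_right on the sorted list
theorem bisect_zero_iff (times : List Int) (s : Int)
    (hsort : List.Pairwise (· ≤ ·) times) :
    PySem.List.bisectRight times s = 0 ↔ ∀ v ∈ times, s < v := by
  obtain ⟨hle, hpre, hsuf⟩ := PySem.List.bisectRight_spec times s hsort
  constructor
  · intro h v hv
    obtain ⟨u, hu, rfl⟩ := List.mem_iff_getElem.mp hv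
    exact hsuf u hu (by omega)
  · intro hall
    by_contra h
    have h1 : PySem.List.bisectRight times s - 1 < times.length := by omega
    exact absurd (hpre _ h1 (by omega)) (not_le_of_gt (hall _ (List.getElem_mem h1)))

theorem bisect_max (times : List Int) (s : Int)
    (hsort : List.Pairwise (· ≤ ·) times) (hj : PySem.List.bisectRight times s ≠ 0) :
    ∃ _ : PySem.List.bisectRight times s - 1 < times.length,
      times[PySem.List.bisectRight times s - 1] ≤ s ∧
      ∀ v ∈ times, v ≤ s → v ≤ times[PySem.List.bisectRight times s - 1] := by
  obtain ⟨hle, hpre, hsuf⟩ := PySem.List.bisectRight_spec times s hsort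
  set j := PySem.List.bisectRight times s with hjdef
  have h1 : j - 1 < times.length := by omega
  refine ⟨h1, hpre _ h1 (by omega), ?_⟩
  intro v hv hvs
  obtain ⟨u, hu, rfl⟩ := List.mem_iff_getElem.mp hv
  by_cases huj : u < j
  · rcases Nat.lt_or_ge u (j - 1) with hu' | hu'
    · exact List.pairwise_iff_getElem.mp hsort u (j - 1) hu h1 hu'
    · have : u = j - 1 := by omega
      subst this; exact le_rfl
  · exact absurd hvs (not_le_of_gt (hsuf u hu (by omega)))

-- multiset surgery
theorem perm_getElem_cons_eraseIdx (l : List Int) (i : Nat) (h : i < l.length) :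
    l.Perm (l[i] :: l.eraseIdx i) := by
  conv_lhs => rw [← List.take_append_drop i l, ← List.getElem_cons_drop h]
  rw [List.eraseIdx_eq_take_drop_succ]
  exact List.perm_middle

theorem set_perm_cons_eraseIdx (l : List Int) (i : Nat) (v : Int) (h : i < l.length) :
    (l.set i v).Perm (v :: l.eraseIdx i) := by
  rw [List.set_eq_take_cons_drop v h, List.eraseIdx_eq_take_drop_succ]
  exact List.perm_middle

theorem insertIdx_eq_take_cons_drop (l : List Int) (i : Nat) (a : Int) (h : i ≤ l.length) :
    l.insertIdx i a = l.take i ++ a :: l.drop i := by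
  induction l generalizing i with
  | nil => simp at h; simp [h]
  | cons x t ih =>
    cases i with
    | zero => simp
    | succ n => simp [List.insertIdx_succ_cons, ih n (by simpa using h)]

theorem pairwise_insertIdx_bisect (l : List Int) (x : Int)
    (hsort : List.Pairwise (· ≤ ·) l) :
    List.Pairwise (· ≤ ·) (l.insertIdx (PySem.List.bisectRight l x) x) := by
  obtain ⟨hle, hpre, hsuf⟩ := PySem.List.bisectRight_spec l x hsort
  set j := PySem.List.bisectRight l x with hjdef
  rw [insertIdx_eq_take_cons_drop l j x hle]
  have hmem_take : ∀ a ∈ l.take j, a ≤ x := by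
    intro a ha
    obtain ⟨u, hu, rfl⟩ := List.mem_iff_getElem.mp ha
    rw [List.getElem_take]
    simp [List.length_take] at hu
    exact hpre u (by omega) (by omega)
  have hmem_drop : ∀ b ∈ l.drop j, x ≤ b := by
    intro b hb
    obtain ⟨u, hu, rfl⟩ := List.mem_iff_getElem.mp hb
    rw [List.getElem_drop]
    exact le_of_lt (hsuf (j + u) (by simp at hu; omega) (by omega))
  rw [List.pairwise_append]
  refine ⟨hsort.sublist (List.take_sublist _ _), ?_, ?_⟩
  · rw [List.pairwise_cons]
    exact ⟨hmem_drop, hsort.sublist (List.drop_sublist _ _)⟩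
  · intro a ha b hb
    have hax := hmem_take a ha
    rcases List.mem_cons.mp hb with rfl | hb'
    · exact hax
    · exact hax.trans (hmem_drop b hb')

-- the one-movie step preserves the simulation
theorem step_sim (members times : List Int) (a : Int) (mv : Int × Int)
    (hperm : members.Perm times) (hsort : List.Pairwise (· ≤ ·) times) :
    (stepA (members, a) mv).2 = (stepB (times, a) mv).2 ∧
    (stepA (members, a) mv).1.Perm (stepB (times, a) mv).1 ∧
    List.Pairwise (· ≤ ·) (stepB (times, a) mv).1 := by
  by_cases hj : PySem.List.bisectRight times mv.1 = 0
  · -- nobody is free: both sides leave the state unchanged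
    have hallT := (bisect_zero_iff times mv.1 hsort).mp hj
    have hallM : ∀ v ∈ members, mv.1 < v := fun v hv => hallT v (hperm.mem_iff.mp hv)
    have hA : findMemberA members mv.1 = none := (findA_none_iff members mv.1).mpr hallM
    have hAeq : stepA (members, a) mv = (members, a) := by simp only [stepA, hA]
    have hBeq : stepB (times, a) mv = (times, a) := by
      simp only [stepB]
      rw [if_neg (by simp [hj])]
    rw [hAeq, hBeq]
    exact ⟨rfl, hperm, hsort⟩
  · -- a member with maximal free time ≤ start exists on both sides, with the same value
    obtain ⟨h1, hM1, hMmax⟩ := bisect_max times mv.1 hsort hj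
    set j := PySem.List.bisectRight times mv.1 with hjdef
    have hexM : ¬ ∀ v ∈ members, mv.1 < v := by
      intro hall
      exact absurd hM1 (not_le_of_gt (hall _ (hperm.mem_iff.mpr (List.getElem_mem h1))))
    cases hA : findMemberA members mv.1 with
    | none => exact absurd ((findA_none_iff members mv.1).mp hA) hexM
    | some p =>
      obtain ⟨t, hp1, htl, hts, hmaxA⟩ := findA_some members mv.1 p hA
      -- the two selected values are both maxima of the same multiset of candidates
      have hMeq : members[t] = times[j - 1] := by
        refine le_antisymm ?_ ?_
        · exact hMmax _ (hperm.mem_iff.mp (List.getElem_mem htl)) hts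
        · exact hmaxA _ (hperm.mem_iff.mpr (List.getElem_mem h1)) hM1
      have hAeq : stepA (members, a) mv = (members.set p.1.toNat mv.2, a + 1) := by
        simp only [stepA, hA]
      have hBeq : stepB (times, a) mv =
          ((times.eraseIdx (j - 1)).insertIdx
            (PySem.List.bisectRight (times.eraseIdx (j - 1)) mv.2) mv.2, a + 1) := by
        simp only [stepB]
        rw [if_pos (by simp [hjdef] at hj ⊢; exact hj)]
      rw [hAeq, hBeq, hp1]
      have htoNat : ((t : Int)).toNat = t := Int.toNat_natCast t
      rw [htoNat]
      have hrest := (hsort.sublist (List.eraseIdx_sublist times (j - 1)))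
      have hjrest : PySem.List.bisectRight (times.eraseIdx (j - 1)) mv.2 ≤
          (times.eraseIdx (j - 1)).length :=
        (PySem.List.bisectRight_spec _ mv.2 hrest).1
      refine ⟨rfl, ?_, ?_⟩
      · -- multisets agree after replacement/surgery
        have e1 : (members.set t mv.2).Perm (mv.2 :: members.eraseIdx t) :=
          set_perm_cons_eraseIdx members t mv.2 htl
        have e2 : members.Perm (members[t] :: members.eraseIdx t) :=
          perm_getElem_cons_eraseIdx members t htl
        have e3 : times.Perm (times[j - 1] :: times.eraseIdx (j - 1)) :=
          perm_getElem_cons_eraseIdx times (j - 1) h1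
        have e4 : (members[t] :: members.eraseIdx t).Perm
            (times[j - 1] :: times.eraseIdx (j - 1)) := e2.symm.trans (hperm.trans e3)
        have e5 : (members.eraseIdx t).Perm (times.eraseIdx (j - 1)) := by
          rw [hMeq] at e4; exact e4.cons_inv
        have e6 : ((times.eraseIdx (j - 1)).insertIdx
            (PySem.List.bisectRight (times.eraseIdx (j - 1)) mv.2) mv.2).Perm
            (mv.2 :: times.eraseIdx (j - 1)) :=
          List.perm_insertIdx mv.2 _ hjrest
        exact e1.trans ((e5.cons mv.2).trans e6.symm)
      · exact pairwise_insertIdx_bisect (times.eraseIdx (j - 1)) mv.2 hrest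

theorem fold_sim (L : List (Int × Int)) :
    ∀ (members times : List Int) (a : Int),
      members.Perm times → List.Pairwise (· ≤ ·) times →
      (L.foldl stepA (members, a)).2 = (L.foldl stepB (times, a)).2 := by
  induction L with
  | nil => intro _ _ _ _ _; rfl
  | cons mv L ih =>
    intro members times a hperm hsort
    obtain ⟨ha, hperm', hsort'⟩ := step_sim members times a mv hperm hsort
    simp only [List.foldl_cons]
    have hA : stepA (members, a) mv = ((stepA (members, a) mv).1, (stepA (members, a) mv).2) := rfl
    have hB : stepB (times, a) mv = ((stepB (times, a) mv).1, (stepB (times, a) mv).2) := rfl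
    rw [hA, hB, ha]
    exact ih _ _ _ hperm' hsort'

-- ===== VERDICT (by name: the statement is the Claim_ definition above) =====
theorem assign_movies_to_members_spec : Claim_equal_assign_movies_to_members := by
  intro k movies _
  unfold Spec_assign_movies_to_members assign_movies_to_members assign_movies_to_members_alt
  exact fold_sim (PySem.List.sorted movies (fun x => x.2)) _ _ 0 (List.Perm.refl _)
    (List.pairwise_replicate.mpr (Or.inr le_rfl))
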